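-- pv_equiv track=rewrite | github.com/fath12/Contact-CRUD-API | 2.B.py | alternate_combine
-- ===== SOURCE A (Python) =====
-- def alternate_combine(list1, list2):
--     combined_list = []
--     min_len = min(len(list1), len(list2))
--
--     for i in range(min_len):
--         combined_list.append(list1[i])
--         combined_list.append(list2[i])
--
--     # Add any remaining elements from the longer list
--     if len(list1) > min_len:
--         combined_list.extend(list1[min_len:])
--     elif len(list2) > min_len:
--         combined_list.extend(list2[min_len:])
--
--     return combined_list
-- ===== SOURCE B (Python) =====
-- def alternate_combine(list1, list2):
--     # Role-swapping cursor walk: keep one cursor per list; each step emits the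
--     # current list's element and exchanges the roles (lists and cursors).
--     # Alternation and the leftover tail both fall out of the swap itself --
--     # no min-length computation and no branching on which list is longer.
--     out = []
--     cur, oth = list1, list2
--     i, j = 0, 0
--     while i < len(cur):
--         out.append(cur[i])
--         cur, oth = oth, cur
--         i, j = j, i + 1
--     out.extend(oth[j:])
--     return out
-- ===== Notes on version B (the rewrite author's own statement) =====
-- stated objective: alternative
-- what changed: Replaced the indexed pair loop up to min(len) plus tail-extension branches by a role-swapping state machine: one cursor per list, each step emits the current list's element and exchanges the lists' roles, so alternation and the leftover tail need no min-length computation or branching.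
import Mathlib
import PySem

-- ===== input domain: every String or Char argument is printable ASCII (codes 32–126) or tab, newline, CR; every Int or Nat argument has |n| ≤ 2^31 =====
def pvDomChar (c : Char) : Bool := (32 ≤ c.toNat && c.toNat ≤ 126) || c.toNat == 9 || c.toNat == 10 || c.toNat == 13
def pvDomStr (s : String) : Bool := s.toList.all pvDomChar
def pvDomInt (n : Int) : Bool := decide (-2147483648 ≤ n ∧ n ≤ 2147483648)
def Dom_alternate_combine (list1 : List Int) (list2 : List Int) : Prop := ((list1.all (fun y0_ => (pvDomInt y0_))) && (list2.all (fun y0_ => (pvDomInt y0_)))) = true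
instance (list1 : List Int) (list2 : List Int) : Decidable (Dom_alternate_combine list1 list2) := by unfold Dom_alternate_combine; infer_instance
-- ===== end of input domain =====

-- B replaces A's min-length index loop and tail-extension branches by a role-swapping
-- cursor walk (emit the current list's element, exchange the lists' roles); no speed claim.


-- ===== PORT A =====
-- for i in range(min_len): indices are 0 ≤ i < min_len, in range for both lists,
-- so list[i] is List.getD i 0 exactly; list[min_len:] with min_len ≥ 0 is List.drop.
def alternate_combine (list1 : List Int) (list2 : List Int) : List Int :=
  let min_len := min list1.length list2.length
  let combined_list := (List.range min_len).foldl
    (fun acc i => (acc ++ [list1.getD i 0]) ++ [list2.getD i 0]) []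
  if list1.length > min_len then combined_list ++ list1.drop min_len
  else if list2.length > min_len then combined_list ++ list2.drop min_len
  else combined_list

-- ===== PORT B =====
-- the while loop: state (cur, oth, i, j, out); each pass appends cur[i] (in range, so
-- getD is exact) and swaps the roles; on exit extends by oth[j:] = List.drop j oth.
def altAcLoop (cur oth : List Int) (i j : Nat) (out : List Int) : List Int :=
  if i < cur.length then
    altAcLoop oth cur j (i + 1) (out ++ [cur.getD i 0])
  else out ++ oth.drop j
termination_by (cur.length - i) + (oth.length - j)
decreasing_by omega

def alternate_combine_alt (list1 : List Int) (list2 : List Int) : List Int :=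
  altAcLoop list1 list2 0 0 []

-- ===== PRECONDITION & SPEC =====
def Spec_alternate_combine (list1 : List Int) (list2 : List Int) (out : List Int) : Prop := out = alternate_combine_alt list1 list2
instance (list1 : List Int) (list2 : List Int) (out : List Int) : Decidable (Spec_alternate_combine list1 list2 out) := by unfold Spec_alternate_combine; infer_instance

-- ===== CLAIM (what is proved, stated in full; the proofs are below) =====
def Claim_equal_alternate_combine : Prop := ∀ (list1 : List Int) (list2 : List Int), Dom_alternate_combine list1 list2 → Spec_alternate_combine list1 list2 (alternate_combine list1 list2)

-- ===== LEMMAS AND PROOFS =====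

-- proof-side characterisation of the interleaving: swap recursion on the suffixes
def itl : List Int → List Int → List Int
  | [], l2 => l2
  | x :: xs, l2 => x :: itl l2 xs
termination_by l1 l2 => l1.length + l2.length
decreasing_by simp; omega

-- B's loop computes out ++ itl (suffix of cur) (suffix of oth)
theorem altAcLoop_eq_itl (cur oth : List Int) (i j : Nat) (out : List Int) :
    altAcLoop cur oth i j out = out ++ itl (cur.drop i) (oth.drop j) := by
  fun_induction altAcLoop cur oth i j out with
  | case1 cur oth i j out h ih =>
    rw [ih]
    have hd : cur.drop i = cur.getD i 0 :: cur.drop (i + 1) := by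
      rw [List.getD_eq_getElem _ _ h]
      exact (List.drop_eq_getElem_cons h)
    rw [hd, itl]
    simp
  | case2 cur oth i j out h =>
    have : cur.drop i = [] := List.drop_eq_nil_of_le (by omega)
    rw [this, itl]

-- A's loop is 'out.extend([l1[i], l2[i]])': flatMap over the range of indices.
theorem altA_flatMap (list1 list2 : List Int) :
    alternate_combine list1 list2 =
      (if list1.length > min list1.length list2.length then
        (List.range (min list1.length list2.length)).flatMap
          (fun i => [list1.getD i 0, list2.getD i 0]) ++ list1.drop (min list1.length list2.length)
      else if list2.length > min list1.length list2.length then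
        (List.range (min list1.length list2.length)).flatMap
          (fun i => [list1.getD i 0, list2.getD i 0]) ++ list2.drop (min list1.length list2.length)
      else (List.range (min list1.length list2.length)).flatMap
          (fun i => [list1.getD i 0, list2.getD i 0])) := by
  unfold alternate_combine
  have h : (List.range (min list1.length list2.length)).foldl
      (fun acc i => (acc ++ [list1.getD i 0]) ++ [list2.getD i 0]) [] =
      (List.range (min list1.length list2.length)).flatMap
        (fun i => [list1.getD i 0, list2.getD i 0]) := by
    have := PySem.List.foldl_append_eq_flatMap
      (l := List.range (min list1.length list2.length))
      (g := fun i => [list1.getD i 0, list2.getD i 0]) (acc := ([] : List Int))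
    simpa [List.append_assoc] using this
  dsimp only
  rw [h]

theorem altA_nil_left (list2 : List Int) : alternate_combine [] list2 = list2 := by
  rw [altA_flatMap]
  cases list2 <;> simp

theorem altA_nil_right (list1 : List Int) : alternate_combine list1 [] = list1 := by
  rw [altA_flatMap]
  cases list1 <;> simp

theorem altA_cons (x y : Int) (xs ys : List Int) :
    alternate_combine (x :: xs) (y :: ys) = x :: y :: alternate_combine xs ys := by
  rw [altA_flatMap, altA_flatMap]
  have hmin : min (x :: xs).length (y :: ys).length = min xs.length ys.length + 1 := by
    simp [Nat.succ_min_succ]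
  rw [hmin]
  have hrange : List.range (min xs.length ys.length + 1) =
      0 :: (List.range (min xs.length ys.length)).map (· + 1) := by
    simp [List.range_succ_eq_map]
  rw [hrange]
  simp only [List.flatMap_cons, List.flatMap_map]
  have hsh : ((List.range (min xs.length ys.length)).flatMap
      (fun i => [(x :: xs).getD (i + 1) 0, (y :: ys).getD (i + 1) 0])) =
      (List.range (min xs.length ys.length)).flatMap
      (fun i => [xs.getD i 0, ys.getD i 0]) := by
    apply List.flatMap_congr <;> intro i _ <;> simp
  rw [hsh]
  simp only [List.length_cons, List.drop_succ_cons, List.getD_cons_zero, gt_iff_lt,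
    Nat.add_lt_add_iff_right]
  split_ifs <;> simp

theorem A_eq_itl (list1 list2 : List Int) :
    alternate_combine list1 list2 = itl list1 list2 := by
  induction list1 generalizing list2 with
  | nil => simpa [itl] using altA_nil_left list2
  | cons x xs ih =>
    cases list2 with
    | nil =>
      rw [altA_nil_right]
      simp [itl]
    | cons y ys =>
      rw [altA_cons, ih]
      simp [itl]

-- ===== VERDICT (by name: the statement is the Claim_ definition above) =====
theorem alternate_combine_spec : Claim_equal_alternate_combine := by
  intro list1 list2 _
  show _ = _
  rw [alternate_combine_alt, altAcLoop_eq_itl, A_eq_itl]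
  simp
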